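-- pv_equiv track=rewrite | github.com/kazaneza/openchat | backend/services/retrieval_service.py | diversify_results
-- ===== SOURCE A (Python) =====
-- from typing import List, Dict, Optional, Tuple
--
-- def diversify_results(results: List[Dict], max_per_document: int = 3) -> List[Dict]:
--     """Ensure diversity by limiting chunks from same document"""
--     document_counts = {}
--     diversified = []
--
--     for result in results:
--         doc_id = result.get('document_id', '')
--         current_count = document_counts.get(doc_id, 0)
--
--         if current_count < max_per_document:
--             diversified.append(result)
--             document_counts[doc_id] = current_count + 1
--
--     return diversified
-- ===== SOURCE B (Python) =====
-- from typing import List, Dict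
--
-- def diversify_results(results: List[Dict], max_per_document: int = 3) -> List[Dict]:
--     """Keep, in order, each result whose document appears fewer than
--     max_per_document times among the earlier results."""
--     def doc(r):
--         return r.get('document_id', '')
--     return [r for i, r in enumerate(results)
--             if sum(1 for s in results[:i] if doc(s) == doc(r)) < max_per_document]
-- ===== Notes on version B (the rewrite author's own statement) =====
-- stated objective: simpler
-- what changed: Replaces the mutable counter-dict running filter with a stateless comprehension that keeps a result iff its document_id occurs fewer than max_per_document times in the prefix before it (trading the dict for a quadratic prefix count).
import Mathlib
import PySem

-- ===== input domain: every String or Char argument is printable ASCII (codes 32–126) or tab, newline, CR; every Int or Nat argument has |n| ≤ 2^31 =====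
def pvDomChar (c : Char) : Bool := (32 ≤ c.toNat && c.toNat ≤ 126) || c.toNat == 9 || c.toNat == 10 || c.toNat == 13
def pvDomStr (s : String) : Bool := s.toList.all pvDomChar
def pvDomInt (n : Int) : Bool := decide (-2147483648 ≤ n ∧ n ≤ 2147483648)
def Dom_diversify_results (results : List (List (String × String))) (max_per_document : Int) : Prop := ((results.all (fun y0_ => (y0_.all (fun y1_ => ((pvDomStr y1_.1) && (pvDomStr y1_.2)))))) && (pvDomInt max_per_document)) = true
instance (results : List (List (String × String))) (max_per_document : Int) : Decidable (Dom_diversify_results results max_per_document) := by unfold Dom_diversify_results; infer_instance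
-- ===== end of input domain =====

-- B replaces A's running counter dict by a stateless prefix-count comprehension; objective: simpler.

-- ===== PORT A =====
-- result.get('document_id', '')
def pvDocIdA (r : List (String × String)) : String :=
  (PySem.Dict.mk r).getD "document_id" ""

def diversify_results (results : List (List (String × String))) (max_per_document : Int) : List (List (String × String)) :=
  (results.foldl
    (fun (st : PySem.Dict String Int × List (List (String × String))) result =>
      let doc_id := pvDocIdA result
      let current_count := st.1.getD doc_id 0
      if current_count < max_per_document then
        (st.1.insert doc_id (current_count + 1), st.2 ++ [result])
      else st)
    (PySem.Dict.empty, [])).2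

-- ===== PORT B =====
def pvDocIdB (r : List (String × String)) : String :=
  (PySem.Dict.mk r).getD "document_id" ""

def diversify_results_alt (results : List (List (String × String))) (max_per_document : Int) : List (List (String × String)) :=
  ((PySem.List.enumerate results 0).filter
    (fun p =>
      ((PySem.List.slice results none (some p.1)).map
        (fun s => if pvDocIdB s == pvDocIdB p.2 then (1 : Int) else 0)).sum < max_per_document)).map (·.2)

-- ===== PRECONDITION & SPEC =====
def Spec_diversify_results (results : List (List (String × String))) (max_per_document : Int) (out : List (List (String × String))) : Prop := out = diversify_results_alt results max_per_document
instance (results : List (List (String × String))) (max_per_document : Int) (out : List (List (String × String))) : Decidable (Spec_diversify_results results max_per_document out) := by unfold Spec_diversify_results; infer_instance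

-- ===== CLAIM (what is proved, stated in full; the proofs are below) =====
def Claim_equal_diversify_results : Prop := ∀ (results : List (List (String × String))) (max_per_document : Int), Dom_diversify_results results max_per_document → Spec_diversify_results results max_per_document (diversify_results results max_per_document)

-- ===== LEMMAS AND PROOFS =====

-- number of elements of pre with the given document id, as an Int
def pvCnt (pre : List (List (String × String))) (d : String) : Int :=
  ((pre.countP (fun s => pvDocIdA s == d) : Nat) : Int)

-- reference recursion both ports are reduced to
def pvRef (m : Int) : List (List (String × String)) → List (List (String × String)) → List (List (String × String))
  | _, [] => []
  | pre, r :: rest =>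
      (if pvCnt pre (pvDocIdA r) < m then [r] else []) ++ pvRef m (pre ++ [r]) rest

lemma pvCnt_append_singleton (pre : List (List (String × String))) (r : List (String × String)) (d : String) :
    pvCnt (pre ++ [r]) d = pvCnt pre d + (if pvDocIdA r == d then 1 else 0) := by
  by_cases h : pvDocIdA r == d <;>
    simp [pvCnt, List.countP_append, h]

lemma pvA_eq_ref (m : Int) (rest pre : List (List (String × String)))
    (counts : PySem.Dict String Int) (acc : List (List (String × String)))
    (hinv : ∀ d, counts.getD d 0 = min (pvCnt pre d) (max 0 m)) :
    (rest.foldl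
      (fun (st : PySem.Dict String Int × List (List (String × String))) result =>
        let doc_id := pvDocIdA result
        let current_count := st.1.getD doc_id 0
        if current_count < m then
          (st.1.insert doc_id (current_count + 1), st.2 ++ [result])
        else st)
      (counts, acc)).2 = acc ++ pvRef m pre rest := by
  induction rest generalizing pre counts acc with
  | nil => simp [pvRef]
  | cons r rest ih =>
    have hcnt : (0:Int) ≤ pvCnt pre (pvDocIdA r) := by
      simp [pvCnt]
    have hcond : (counts.getD (pvDocIdA r) 0 < m) ↔ (pvCnt pre (pvDocIdA r) < m) := by
      rw [hinv]; omega
    by_cases h : counts.getD (pvDocIdA r) 0 < m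
    · have h' : pvCnt pre (pvDocIdA r) < m := hcond.mp h
      simp only [List.foldl_cons, pvRef, if_pos h, if_pos h']
      rw [ih (pre ++ [r]) _ _ ?_]
      · simp
      · intro d
        rw [PySem.Dict.getD_insert, pvCnt_append_singleton, hinv]
        by_cases hd : d = pvDocIdA r
        · subst hd
          simp only [beq_self_eq_true, if_pos]
          have := hinv (pvDocIdA r)
          omega
        · have hne : (pvDocIdA r == d) = false := by
            simp [beq_eq_false_iff_ne]; exact fun hh => hd hh.symm
          simp only [hd, hne, if_false, Bool.false_eq_true]
          rw [hinv]
          simp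
    · have h' : ¬ pvCnt pre (pvDocIdA r) < m := fun hh => h (hcond.mpr hh)
      simp only [List.foldl_cons, pvRef, if_neg h, if_neg h']
      rw [ih (pre ++ [r]) _ _ ?_]
      · simp
      · intro d
        rw [pvCnt_append_singleton, hinv]
        by_cases hd : pvDocIdA r = d
        · subst hd
          have := hinv (pvDocIdA r)
          simp only [beq_self_eq_true, if_pos]
          omega
        · simp [hd]

lemma pvB_eq_ref (m : Int) (rest pre results : List (List (String × String)))
    (hsplit : results = pre ++ rest) :
    ((PySem.List.enumerate rest (pre.length : Int)).filter
      (fun p =>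
        ((PySem.List.slice results none (some p.1)).map
          (fun s => if pvDocIdB s == pvDocIdB p.2 then (1 : Int) else 0)).sum < m)).map (·.2)
      = pvRef m pre rest := by
  induction rest generalizing pre with
  | nil => simp [PySem.List.enumerate_nil, pvRef]
  | cons r rest ih =>
    rw [PySem.List.enumerate_cons]
    have hslice : PySem.List.slice results none (some (pre.length : Int)) = pre := by
      rw [PySem.List.slice_to_natCast, hsplit]
      simp
    have hsum : ((PySem.List.slice results none (some (pre.length : Int))).map
        (fun s => if pvDocIdB s == pvDocIdB r then (1 : Int) else 0)).sum
        = pvCnt pre (pvDocIdA r) := by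
      rw [hslice, PySem.List.sum_map_ite_one_zero]
      simp [pvCnt, pvDocIdB, pvDocIdA]
    have hstep : ((pre.length : Int) + 1) = (((pre ++ [r]).length : Nat) : Int) := by
      simp
    by_cases h : pvCnt pre (pvDocIdA r) < m
    · rw [List.filter_cons_of_pos (by simp only [decide_eq_true_eq]; rw [hsum]; exact h)]
      simp only [List.map_cons, pvRef, if_pos h]
      rw [hstep, ih (pre ++ [r]) (by simp [hsplit])]
      simp
    · rw [List.filter_cons_of_neg (by simp only [decide_eq_true_eq]; rw [hsum]; exact h)]
      simp only [pvRef, if_neg h]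
      rw [hstep, ih (pre ++ [r]) (by simp [hsplit])]
      simp

-- ===== VERDICT (by name: the statement is the Claim_ definition above) =====
theorem diversify_results_spec : Claim_equal_diversify_results := by
  intro results m _
  show diversify_results results m = diversify_results_alt results m
  unfold diversify_results diversify_results_alt
  rw [pvA_eq_ref m results [] PySem.Dict.empty []
      (by intro d; simp [pvCnt, PySem.Dict.getD_empty])]
  have hb := pvB_eq_ref m results [] results rfl
  simp only [List.length_nil, Nat.cast_zero] at hb
  rw [← hb]
  simp
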